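-- pv_equiv track=rewrite | github.com/Lcoderfit/Introduction-to-algotithms | 十二、剑指offer-Python/-7.数字在排序数组中出现的次数.py | GetRightK
-- ===== SOURCE A (Python) =====
-- def GetRightK(data, k, left, right):
--     while left <= right:
--         mid = (left + right) // 2
--         if data[mid] <= k:
--             left += 1
--         else:
--             right -= 1
--     return right
-- ===== SOURCE B (Python) =====
-- def GetRightK(data, k, left, right):
--     # Boundary scan from the midpoint: find where data crosses k around mid.
--     if left > right:
--         return right
--     mid = (left + right) // 2
--     if data[mid] <= k:
--         j = mid
--         while j < right and data[j + 1] <= k: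
--             j += 1
--         return j
--     else:
--         j = mid - 1
--         while j >= left and data[j] > k:
--             j -= 1
--         return j
-- ===== Notes on version B (the rewrite author's own statement) =====
-- stated objective: alternative
-- what changed: B replaces the shrinking-window loop (which always runs right-left+1 iterations re-probing the moving midpoint) by a single directional boundary scan: probe the initial midpoint once, then walk index-by-index to the crossing point of k and stop there; Pre_ excludes non-empty windows reaching outside [-len(data), len(data)), where A raises IndexError or returns only through negative-index wraparound.
-- outside the precondition, e.g. on GetRightK([5], 5, -2, 0): A returns 0, B returns 0
import Mathlib
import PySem

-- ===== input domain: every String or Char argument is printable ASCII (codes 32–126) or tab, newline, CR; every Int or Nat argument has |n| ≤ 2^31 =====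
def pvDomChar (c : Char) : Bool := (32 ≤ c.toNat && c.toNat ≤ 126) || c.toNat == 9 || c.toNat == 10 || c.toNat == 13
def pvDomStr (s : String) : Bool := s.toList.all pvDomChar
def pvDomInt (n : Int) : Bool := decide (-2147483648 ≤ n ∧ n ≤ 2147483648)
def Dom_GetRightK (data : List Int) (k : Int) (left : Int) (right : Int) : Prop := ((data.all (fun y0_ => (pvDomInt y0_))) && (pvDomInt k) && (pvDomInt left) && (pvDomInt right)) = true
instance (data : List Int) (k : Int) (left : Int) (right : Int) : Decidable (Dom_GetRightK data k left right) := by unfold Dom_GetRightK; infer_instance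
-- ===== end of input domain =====

-- B replaces A's shrinking-window loop (always right-left+1 iterations probing the moving
-- midpoint) by a single directional boundary scan outward from the initial midpoint.

-- ===== PORT A =====
def GetRightK (data : List Int) (k : Int) (left : Int) (right : Int) : Int :=
  if _h : left ≤ right then
    match PySem.List.pyGet? data (PySem.Int.floordiv (left + right) 2) with
    | some v =>
        if v ≤ k then GetRightK data k (left + 1) right
        else GetRightK data k left (right - 1)
    | none => right   -- data[mid] raises IndexError in Python here; excluded by Pre_
  else right
termination_by (right + 1 - left).toNat
decreasing_by all_goals omega

-- ===== PORT B =====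
-- the scan `while j < right and data[j + 1] <= k: j += 1`
-- (fuel = (right - j).toNat counts the remaining room, so fuel = 0 ↔ ¬ j < right:
--  the loop guard, expressed structurally)
def bScanUpGo (data : List Int) (k : Int) (right : Int) : Nat → Int → Int
  | 0, j => j
  | fuel + 1, j =>
    match PySem.List.pyGet? data (j + 1) with
    | some v => if v ≤ k then bScanUpGo data k right fuel (j + 1) else j
    | none => j   -- data[j+1] raises IndexError in Python here; excluded by Pre_

def bScanUp (data : List Int) (k : Int) (j : Int) (right : Int) : Int :=
  bScanUpGo data k right (right - j).toNat j

-- the scan `while j >= left and data[j] > k: j -= 1`  (fuel = (j + 1 - left).toNat)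
def bScanDownGo (data : List Int) (k : Int) (left : Int) : Nat → Int → Int
  | 0, j => j
  | fuel + 1, j =>
    match PySem.List.pyGet? data j with
    | some v => if v ≤ k then j else bScanDownGo data k left fuel (j - 1)
    | none => j   -- data[j] raises IndexError in Python here; excluded by Pre_

def bScanDown (data : List Int) (k : Int) (j : Int) (left : Int) : Int :=
  bScanDownGo data k left (j + 1 - left).toNat j

def GetRightK_alt (data : List Int) (k : Int) (left : Int) (right : Int) : Int :=
  if left > right then right
  else
    let mid := PySem.Int.floordiv (left + right) 2
    match PySem.List.pyGet? data mid with
    | some v => if v ≤ k then bScanUp data k mid right else bScanDown data k (mid - 1) left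
    | none => right   -- data[mid] raises IndexError in Python here; excluded by Pre_

-- ===== PRECONDITION & SPEC =====
-- Pre_ excludes non-empty windows reaching outside the valid Python index range
-- [-len(data), len(data)): there A raises IndexError, or returns only through
-- Python's negative-index wraparound (an accident of indexing, not of the search).
def Pre_GetRightK (data : List Int) (k : Int) (left : Int) (right : Int) : Prop :=
  left > right ∨ (-(data.length : Int) ≤ left ∧ right < (data.length : Int))
instance (data : List Int) (k : Int) (left : Int) (right : Int) : Decidable (Pre_GetRightK data k left right) := by unfold Pre_GetRightK; infer_instance

def pvWitness_GetRightK : List Int × Int × Int × Int := ([1, 2, 2, 3], 2, 0, 3)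

def Spec_GetRightK (data : List Int) (k : Int) (left : Int) (right : Int) (out : Int) : Prop := out = GetRightK_alt data k left right
instance (data : List Int) (k : Int) (left : Int) (right : Int) (out : Int) : Decidable (Spec_GetRightK data k left right out) := by unfold Spec_GetRightK; infer_instance

-- ===== CLAIM (what is proved, stated in full; the proofs are below) =====
def Claim_equal_GetRightK : Prop := ∀ (data : List Int) (k : Int) (left : Int) (right : Int), Dom_GetRightK data k left right → Pre_GetRightK data k left right → Spec_GetRightK data k left right (GetRightK data k left right)

-- ===== LEMMAS AND PROOFS =====

-- one-step unfoldings of the two scans, in loop form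
theorem bScanUp_eq (data : List Int) (k : Int) (j : Int) (right : Int) :
    bScanUp data k j right =
      if j < right then
        match PySem.List.pyGet? data (j + 1) with
        | some v => if v ≤ k then bScanUp data k (j + 1) right else j
        | none => j
      else j := by
  unfold bScanUp
  by_cases h : j < right
  · obtain ⟨n, hn⟩ : ∃ n, (right - j).toNat = n + 1 := ⟨(right - j).toNat - 1, by omega⟩
    rw [hn, if_pos h, (show (right - (j + 1)).toNat = n by omega)]
    rfl
  · rw [(show (right - j).toNat = 0 by omega), if_neg h]
    rfl

theorem bScanDown_eq (data : List Int) (k : Int) (j : Int) (left : Int) :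
    bScanDown data k j left =
      if left ≤ j then
        match PySem.List.pyGet? data j with
        | some v => if v ≤ k then j else bScanDown data k (j - 1) left
        | none => j
      else j := by
  unfold bScanDown
  by_cases h : left ≤ j
  · obtain ⟨n, hn⟩ : ∃ n, (j + 1 - left).toNat = n + 1 := ⟨(j + 1 - left).toNat - 1, by omega⟩
    rw [hn, if_pos h, (show (j - 1 + 1 - left).toNat = n by omega)]
    rfl
  · rw [(show (j + 1 - left).toNat = 0 by omega), if_neg h]
    rfl

theorem pvGetSome {A : Type} (xs : List A) (i : Int)
    (h1 : -(xs.length : Int) ≤ i) (h2 : i < (xs.length : Int)) :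
    ∃ v, PySem.List.pyGet? xs i = some v := by
  have h : PySem.Raise.InRange xs.length i := by
    unfold PySem.Raise.InRange; omega
  rcases hg : PySem.List.pyGet? xs i with _ | v
  · exact absurd ((PySem.List.pyGet?_eq_none_iff xs i).mp hg) (by simp [h])
  · exact ⟨v, rfl⟩

theorem pvMidBounds {l r : Int} (h : l ≤ r) :
    l ≤ PySem.Int.floordiv (l + r) 2 ∧ PySem.Int.floordiv (l + r) 2 ≤ r := by
  rw [PySem.Int.floordiv_eq_ediv_of_pos (by omega : (0:Int) < 2)]
  omega

-- main induction: A's shrinking-window loop equals B's boundary scan on in-range windows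
theorem A_eq_B (data : List Int) (k : Int) :
    ∀ (N : Nat) (l r : Int), (r + 1 - l).toNat ≤ N →
      -(data.length : Int) ≤ l → r < (data.length : Int) →
      GetRightK data k l r = GetRightK_alt data k l r := by
  intro N
  induction N with
  | zero =>
    intro l r hN _ _
    have hlr : l > r := by omega
    rw [GetRightK, GetRightK_alt]
    simp [hlr, (show ¬ (l ≤ r) by omega)]
  | succ N ih =>
    intro l r hN hlo hhi
    by_cases hlr : l ≤ r
    · have hmid := pvMidBounds hlr
      obtain ⟨v, hv⟩ := pvGetSome data (PySem.Int.floordiv (l + r) 2) (by omega) (by omega)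
      set m : Int := PySem.Int.floordiv (l + r) 2 with hm
      have hm2 : m * 2 ≤ l + r ∧ l + r < (m + 1) * 2 :=
        (PySem.Int.floordiv_eq_iff_of_pos (by omega)).mp hm.symm
      rw [GetRightK, GetRightK_alt]
      simp only [dif_pos hlr, if_neg (by omega : ¬ l > r), ← hm, hv]
      by_cases hvk : v ≤ k
      · simp only [if_pos hvk]
        rw [ih (l + 1) r (by omega) (by omega) hhi]
        by_cases hlr' : l + 1 ≤ r
        · -- compare B at (l+1, r) with bScanUp from m
          have hmid' := pvMidBounds hlr'
          obtain ⟨w, hw⟩ := pvGetSome data (PySem.Int.floordiv (l + 1 + r) 2) (by omega) (by omega)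
          set m' : Int := PySem.Int.floordiv (l + 1 + r) 2 with hm'
          have hm'2 : m' * 2 ≤ l + 1 + r ∧ l + 1 + r < (m' + 1) * 2 :=
            (PySem.Int.floordiv_eq_iff_of_pos (by omega)).mp hm'.symm
          have hcase : m' = m ∨ m' = m + 1 := by omega
          rw [GetRightK_alt]
          simp only [if_neg (by omega : ¬ l + 1 > r), ← hm', hw]
          rcases hcase with hc | hc
          · -- same midpoint: same branch, same scan
            have hwv : w = v := by rw [hc] at hw; rw [hw] at hv; injection hv
            subst hwv
            simp [hvk, hc]
          · by_cases hwk : w ≤ k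
            · -- bScanUp from m takes exactly one step to m' = m + 1
              simp only [if_pos hwk, hc]
              conv_rhs => rw [bScanUp_eq]
              rw [if_pos (show m < r by omega)]
              rw [hc] at hw
              simp [hw, hwk]
            · -- both sides return m
              simp only [if_neg hwk]
              have h1 : bScanDown data k (m' - 1) (l + 1) = m := by
                rw [show m' - 1 = m by omega]
                rw [bScanDown_eq]
                by_cases hml : l + 1 ≤ m
                · rw [if_pos hml, hv]
                  simp [hvk]
                · rw [if_neg hml]
              have h2 : bScanUp data k m r = m := by
                rw [bScanUp_eq, if_pos (show m < r by omega)]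
                rw [show m + 1 = m' by omega, hw]
                simp [hwk]
              rw [h1, h2]
        · -- l = r: recursive window is empty, and the scan cannot move either
          rw [GetRightK_alt]
          rw [if_pos (by omega : l + 1 > r)]
          rw [bScanUp_eq, if_neg (by omega : ¬ m < r)]
          omega
      · simp only [if_neg hvk]
        rw [ih l (r - 1) (by omega) hlo (by omega)]
        by_cases hlr' : l ≤ r - 1
        · have hmid' := pvMidBounds hlr'
          obtain ⟨w, hw⟩ := pvGetSome data (PySem.Int.floordiv (l + (r - 1)) 2) (by omega) (by omega)
          set m' : Int := PySem.Int.floordiv (l + (r - 1)) 2 with hm'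
          have hm'2 : m' * 2 ≤ l + (r - 1) ∧ l + (r - 1) < (m' + 1) * 2 :=
            (PySem.Int.floordiv_eq_iff_of_pos (by omega)).mp hm'.symm
          have hcase : m' = m ∨ m' = m - 1 := by omega
          rw [GetRightK_alt]
          simp only [if_neg (by omega : ¬ l > r - 1), ← hm', hw]
          rcases hcase with hc | hc
          · -- same midpoint: same branch, same scan
            have hwv : w = v := by rw [hc] at hw; rw [hw] at hv; injection hv
            subst hwv
            simp [hvk, hc]
          · by_cases hwk : w ≤ k
            · -- both sides return m - 1
              simp only [if_pos hwk]
              have h1 : bScanUp data k m' (r - 1) = m - 1 := by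
                rw [bScanUp_eq]
                by_cases hmr : m' < r - 1
                · rw [if_pos hmr]
                  rw [show m' + 1 = m by omega, hv]
                  simp only [if_neg hvk]
                  omega
                · rw [if_neg hmr]; omega
              have h2 : bScanDown data k (m - 1) l = m - 1 := by
                rw [bScanDown_eq, if_pos (show l ≤ m - 1 by omega)]
                rw [show m - 1 = m' by omega, hw]
                simp only [if_pos hwk]
              rw [h1, h2]
            · -- bScanDown from m - 1 takes exactly one step to m' - 1 = m - 2
              simp only [if_neg hwk]
              conv_rhs => rw [bScanDown_eq]
              rw [if_pos (show l ≤ m - 1 by omega)]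
              rw [show m - 1 = m' by omega, hw]
              simp [hwk]
        · -- l = r: recursive window is empty, and the scan cannot move either
          rw [GetRightK_alt]
          rw [if_pos (by omega : l > r - 1)]
          rw [bScanDown_eq, if_neg (by omega : ¬ l ≤ m - 1)]
          omega
    · rw [GetRightK, GetRightK_alt]
      simp [hlr, (show l > r by omega)]

-- ===== VERDICT (by name: the statement is the Claim_ definition above) =====
theorem GetRightK_spec : Claim_equal_GetRightK := by
  intro data k left right _hdom hpre
  unfold Spec_GetRightK
  rcases hpre with h | ⟨hlo, hhi⟩
  · rw [GetRightK, GetRightK_alt]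
    simp [h, (show ¬ left ≤ right by omega)]
  · exact A_eq_B data k (right + 1 - left).toNat left right (le_refl _) hlo hhi
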